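-- pv_equiv track=rewrite | github.com/WebWakaHub/webwaka-system-admin-dashboard | docs/cross-layer-integration-report/scripts/verification/verify_all_issues.py | classify_issue
-- ===== SOURCE A (Python) =====
-- def classify_issue(title):
--     """Classify issue as master, phase, or task"""
--     if not title:
--         return "unknown", -1, -1
--
--     # Check for task pattern: -P0-T01, -P1-T02, etc.
--     for p in range(7):
--         for t in range(1, 4):
--             if f"-P{p}-T{t:02d}" in title or f"-P{p}-T0{t}" in title:
--                 return "task", p, t
--
--     # Check for phase pattern: -P0, -P1, etc. (without task)
--     for p in range(7):
--         if f"-P{p}" in title and not any(f"-T0{t}" in title for t in range(1, 4)):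
--             return "phase", p, -1
--
--     # Must be master
--     return "master", -1, -1
-- ===== SOURCE B (Python) =====
-- def classify_issue(title):
--     """Classify issue as master, phase, or task"""
--     if not title:
--         return "unknown", -1, -1
--     # One forward scan over the title collecting every marker occurrence (alternative single-pass strategy).
--     tasks = []        # all (p, t) with "-P{p}-T0{t}" at some position
--     phases = []       # all p with "-P{p}" at some position
--     task_marker = False  # any "-T0{t}" anywhere
--     for i, c in enumerate(title):
--         if c != '-':
--             continue
--         w = title[i + 1:i + 7]
--         if len(w) >= 2 and w[0] == 'P' and w[1] in '0123456':
--             phases.append(int(w[1]))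
--             if len(w) == 6 and w[2] == '-' and w[3] == 'T' and w[4] == '0' and w[5] in '123':
--                 tasks.append((int(w[1]), int(w[5])))
--         if len(w) >= 3 and w[0] == 'T' and w[1] == '0' and w[2] in '123':
--             task_marker = True
--     if tasks:
--         p, t = min(tasks)
--         return "task", p, t
--     if phases and not task_marker:
--         return "phase", min(phases), -1
--     return "master", -1, -1
-- ===== Notes on version B (the rewrite author's own statement) =====
-- stated objective: alternative
-- what changed: A probes the title with up to 25 separate substring searches (21 task patterns, then 7 phase patterns and 3 task markers); B makes one forward scan over the title collecting every task/phase/marker occurrence and returns the lexicographically minimal (p,t) pair resp. minimal p.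
import Mathlib
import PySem

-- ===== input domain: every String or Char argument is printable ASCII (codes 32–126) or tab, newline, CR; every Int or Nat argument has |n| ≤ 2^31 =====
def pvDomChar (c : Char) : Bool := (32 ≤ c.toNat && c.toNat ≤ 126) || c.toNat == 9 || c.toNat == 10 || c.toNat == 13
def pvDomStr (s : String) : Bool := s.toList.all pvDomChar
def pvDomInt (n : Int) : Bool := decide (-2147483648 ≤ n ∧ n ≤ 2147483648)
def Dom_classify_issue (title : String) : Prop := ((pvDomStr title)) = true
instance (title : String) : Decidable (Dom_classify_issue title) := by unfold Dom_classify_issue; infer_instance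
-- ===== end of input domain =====

-- B replaces A's repeated substring searches by ONE forward scan over the title that collects
-- every task/phase/marker occurrence, then takes the minimum (objective: alternative algorithm).

-- ===== PORT A =====
-- f"{t:02d}" (zero-pad to width 2); exact via PySem.Chars.zfill
def pvFmt02 (t : Int) : List Char := PySem.Chars.zfill (PySem.Int.toChars t) 2

def classify_issue (title : String) : String × Int × Int :=
  -- `not title` = empty string; f-strings built on the List Char side (String.append is opaque)
  if title.toList = [] then ("unknown", -1, -1)
  else
    match (PySem.List.pyRange 0 7 1).findSome? (fun p =>
      (PySem.List.pyRange 1 4 1).findSome? (fun t =>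
        if (PySem.Chars.isIn (['-','P'] ++ PySem.Int.toChars p ++ ['-','T'] ++ pvFmt02 t) title.toList
            || PySem.Chars.isIn (['-','P'] ++ PySem.Int.toChars p ++ ['-','T','0'] ++ PySem.Int.toChars t) title.toList)
        then some (p, t) else none)) with
    | some (p, t) => ("task", p, t)
    | none =>
      match (PySem.List.pyRange 0 7 1).find? (fun p =>
        PySem.Chars.isIn (['-','P'] ++ PySem.Int.toChars p) title.toList
        && !((PySem.List.pyRange 1 4 1).any (fun t =>
             PySem.Chars.isIn (['-','T','0'] ++ PySem.Int.toChars t) title.toList))) with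
      | some p => ("phase", p, -1)
      | none => ("master", -1, -1)

-- ===== PORT B =====
-- int(<single digit char>); exact on '0'..'9'
def pvDigitVal (c : Char) : Int := (c.toNat : Int) - 48

-- the test B makes on the window w = title[i+1:i+7] after seeing '-' at i:
-- w[0]=='P' and w[1] in '0123456' and len(w)==6 and w[2]=='-' and w[3]=='T' and w[4]=='0' and w[5] in '123'
def pvTaskAt : List Char → Option (Int × Int)
  | 'P' :: c :: '-' :: 'T' :: '0' :: d :: _ =>
      if c ∈ ['0','1','2','3','4','5','6'] ∧ d ∈ ['1','2','3']
      then some (pvDigitVal c, pvDigitVal d) else none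
  | _ => none

-- len(w)>=2 and w[0]=='P' and w[1] in '0123456'
def pvPhaseAt : List Char → Option Int
  | 'P' :: c :: _ => if c ∈ ['0','1','2','3','4','5','6'] then some (pvDigitVal c) else none
  | _ => none

-- len(w)>=3 and w[0]=='T' and w[1]=='0' and w[2] in '123'
def pvMarkAt : List Char → Bool
  | 'T' :: '0' :: d :: _ => decide (d ∈ ['1','2','3'])
  | _ => false

-- B's single forward loop (structural recursion over the suffix; same append order)
def pvScan : List Char → List (Int × Int) × List Int × Bool
  | [] => ([], [], false)
  | c :: rest =>
    let r := pvScan rest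
    if c = '-' then
      ((match pvTaskAt rest with | some q => q :: r.1 | none => r.1),
       (match pvPhaseAt rest with | some p => p :: r.2.1 | none => r.2.1),
       pvMarkAt rest || r.2.2)
    else r

-- min of two int pairs / ints, first-on-tie (Python's builtin min as a fold)
def pvMin2 (x y : Int × Int) : Int × Int := if y.1 < x.1 ∨ (y.1 = x.1 ∧ y.2 < x.2) then y else x
def pvMinI (x y : Int) : Int := if y < x then y else x

def classify_issue_alt (title : String) : String × Int × Int :=
  if title.toList = [] then ("unknown", -1, -1)
  else
    let r := pvScan title.toList
    match r.1 with
    | q :: qs => let m := qs.foldl pvMin2 q; ("task", m.1, m.2)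
    | [] =>
      match r.2.1 with
      | p :: ps => if r.2.2 then ("master", -1, -1) else ("phase", ps.foldl pvMinI p, -1)
      | [] => ("master", -1, -1)

-- ===== PRECONDITION & SPEC =====
def Spec_classify_issue (title : String) (out : String × Int × Int) : Prop := out = classify_issue_alt title
instance (title : String) (out : String × Int × Int) : Decidable (Spec_classify_issue title out) := by unfold Spec_classify_issue; infer_instance

-- ===== CLAIM (what is proved, stated in full; the proofs are below) =====
def Claim_equal_classify_issue : Prop := ∀ (title : String), Dom_classify_issue title → Spec_classify_issue title (classify_issue title)

-- ===== LEMMAS AND PROOFS =====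

-- digit alphabets
def pvD7 : List Char := ['0','1','2','3','4','5','6']
def pvD3 : List Char := ['1','2','3']

-- lexicographic orders on int pairs (Python tuple comparison)
def pvLexle (x y : Int × Int) : Prop := x.1 < y.1 ∨ (x.1 = y.1 ∧ x.2 ≤ y.2)
def pvLexlt (x y : Int × Int) : Prop := x.1 < y.1 ∨ (x.1 = y.1 ∧ x.2 < y.2)

-- all (p, t) pairs A ever tests, in A's probe order (lex-sorted)
def pvEnumP : List (Int × Int) :=
  [(0,1),(0,2),(0,3),(1,1),(1,2),(1,3),(2,1),(2,2),(2,3),(3,1),(3,2),(3,3),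
   (4,1),(4,2),(4,3),(5,1),(5,2),(5,3),(6,1),(6,2),(6,3)]

theorem pvScan_cons (c : Char) (rest : List Char) :
    pvScan (c :: rest) =
      (if c = '-' then
        ((match pvTaskAt rest with | some q => q :: (pvScan rest).1 | none => (pvScan rest).1),
         (match pvPhaseAt rest with | some p => p :: (pvScan rest).2.1 | none => (pvScan rest).2.1),
         pvMarkAt rest || (pvScan rest).2.2)
      else pvScan rest) := rfl

-- ---- shape lemmas for the window tests ----
theorem pvTaskAt_eq_some_iff (r : List Char) (q : Int × Int) :
    pvTaskAt r = some q ↔ ∃ c d, c ∈ pvD7 ∧ d ∈ pvD3 ∧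
      q = (pvDigitVal c, pvDigitVal d) ∧ ['P',c,'-','T','0',d] <+: r := by
  constructor
  · intro h
    unfold pvTaskAt at h
    split at h
    · rename_i c d tl
      split_ifs at h with hcd
      · injection h with h; exact ⟨c, d, hcd.1, hcd.2, h.symm, tl, rfl⟩
    · exact absurd h (by simp)
  · rintro ⟨c, d, hc, hd, rfl, t, rfl⟩
    have hc' : c ∈ ['0','1','2','3','4','5','6'] := hc
    have hd' : d ∈ ['1','2','3'] := hd
    simp only [List.cons_append, List.nil_append]
    simp [pvTaskAt, hc', hd']

theorem pvPhaseAt_eq_some_iff (r : List Char) (p : Int) :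
    pvPhaseAt r = some p ↔ ∃ c, c ∈ pvD7 ∧ p = pvDigitVal c ∧ ['P',c] <+: r := by
  constructor
  · intro h
    unfold pvPhaseAt at h
    split at h
    · rename_i c tl
      split_ifs at h with hc
      · injection h with h; exact ⟨c, hc, h.symm, tl, rfl⟩
    · exact absurd h (by simp)
  · rintro ⟨c, hc, rfl, t, rfl⟩
    have hc' : c ∈ ['0','1','2','3','4','5','6'] := hc
    simp only [List.cons_append, List.nil_append]
    simp [pvPhaseAt, hc']

theorem pvMarkAt_eq_true_iff (r : List Char) :
    pvMarkAt r = true ↔ ∃ d, d ∈ pvD3 ∧ ['T','0',d] <+: r := by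
  constructor
  · intro h
    unfold pvMarkAt at h
    split at h
    · rename_i d tl
      simp only [decide_eq_true_iff] at h
      exact ⟨d, h, tl, rfl⟩
    · exact absurd h (by simp)
  · rintro ⟨d, hd, t, rfl⟩
    have hd' : d ∈ ['1','2','3'] := hd
    simp only [List.cons_append, List.nil_append]
    simp [pvMarkAt, hd']

-- ---- scan characterisations ----
theorem pv_scan_task_mem (l : List Char) (q : Int × Int) :
    q ∈ (pvScan l).1 ↔ ∃ r, ('-' :: r) <:+ l ∧ pvTaskAt r = some q := by
  induction l with
  | nil => simp [pvScan]
  | cons c rest ih =>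
    by_cases hc : c = '-'
    · subst hc
      rw [pvScan_cons, if_pos rfl]
      cases htask : pvTaskAt rest with
      | none =>
        simp only [htask, List.suffix_cons_iff, ih]
        constructor
        · rintro ⟨r, hs, h⟩; exact ⟨r, Or.inr hs, h⟩
        · rintro ⟨r, (he | hs), h⟩
          · injection he with _ h2; subst h2; rw [htask] at h; exact absurd h (by simp)
          · exact ⟨r, hs, h⟩
      | some q' =>
        simp only [htask, List.mem_cons, List.suffix_cons_iff, ih]
        constructor
        · rintro (rfl | ⟨r, hs, h⟩)
          · exact ⟨rest, Or.inl rfl, htask⟩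
          · exact ⟨r, Or.inr hs, h⟩
        · rintro ⟨r, (he | hs), h⟩
          · injection he with _ h2; subst h2; rw [htask] at h
            injection h with h; exact Or.inl h.symm
          · exact Or.inr ⟨r, hs, h⟩
    · rw [pvScan_cons, if_neg hc, ih]
      constructor
      · rintro ⟨r, hs, h⟩; exact ⟨r, (List.suffix_cons_iff).2 (Or.inr hs), h⟩
      · rintro ⟨r, hs, h⟩
        rcases (List.suffix_cons_iff).1 hs with he | hs'
        · injection he with h1 _; exact absurd h1.symm hc
        · exact ⟨r, hs', h⟩

theorem pv_scan_phase_mem (l : List Char) (p : Int) :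
    p ∈ (pvScan l).2.1 ↔ ∃ r, ('-' :: r) <:+ l ∧ pvPhaseAt r = some p := by
  induction l with
  | nil => simp [pvScan]
  | cons c rest ih =>
    by_cases hc : c = '-'
    · subst hc
      rw [pvScan_cons, if_pos rfl]
      cases hph : pvPhaseAt rest with
      | none =>
        simp only [hph, List.suffix_cons_iff, ih]
        constructor
        · rintro ⟨r, hs, h⟩; exact ⟨r, Or.inr hs, h⟩
        · rintro ⟨r, (he | hs), h⟩
          · injection he with _ h2; subst h2; rw [hph] at h; exact absurd h (by simp)
          · exact ⟨r, hs, h⟩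
      | some p' =>
        simp only [hph, List.mem_cons, List.suffix_cons_iff, ih]
        constructor
        · rintro (rfl | ⟨r, hs, h⟩)
          · exact ⟨rest, Or.inl rfl, hph⟩
          · exact ⟨r, Or.inr hs, h⟩
        · rintro ⟨r, (he | hs), h⟩
          · injection he with _ h2; subst h2; rw [hph] at h
            injection h with h; exact Or.inl h.symm
          · exact Or.inr ⟨r, hs, h⟩
    · rw [pvScan_cons, if_neg hc, ih]
      constructor
      · rintro ⟨r, hs, h⟩; exact ⟨r, (List.suffix_cons_iff).2 (Or.inr hs), h⟩
      · rintro ⟨r, hs, h⟩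
        rcases (List.suffix_cons_iff).1 hs with he | hs'
        · injection he with h1 _; exact absurd h1.symm hc
        · exact ⟨r, hs', h⟩

theorem pv_scan_mark (l : List Char) :
    (pvScan l).2.2 = true ↔ ∃ r, ('-' :: r) <:+ l ∧ pvMarkAt r = true := by
  induction l with
  | nil => simp [pvScan]
  | cons c rest ih =>
    by_cases hc : c = '-'
    · subst hc
      rw [pvScan_cons, if_pos rfl]
      simp only [Bool.or_eq_true, ih, List.suffix_cons_iff]
      constructor
      · rintro (hm | ⟨r, hs, h⟩)
        · exact ⟨rest, Or.inl rfl, hm⟩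
        · exact ⟨r, Or.inr hs, h⟩
      · rintro ⟨r, (he | hs), h⟩
        · injection he with _ h2; subst h2; exact Or.inl h
        · exact Or.inr ⟨r, hs, h⟩
    · rw [pvScan_cons, if_neg hc, ih]
      constructor
      · rintro ⟨r, hs, h⟩; exact ⟨r, (List.suffix_cons_iff).2 (Or.inr hs), h⟩
      · rintro ⟨r, hs, h⟩
        rcases (List.suffix_cons_iff).1 hs with he | hs'
        · injection he with h1 _; exact absurd h1.symm hc
        · exact ⟨r, hs', h⟩

-- ---- infix bridge ----
theorem pv_infix_cons_iff (a : Char) (xs l : List Char) :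
    (a :: xs) <:+: l ↔ ∃ r, (a :: r) <:+ l ∧ xs <+: r := by
  rw [List.infix_iff_prefix_suffix]
  constructor
  · rintro ⟨t, hp, hs⟩
    cases t with
    | nil => exact absurd hp (by simp)
    | cons b t' =>
      rw [List.cons_prefix_cons] at hp
      obtain ⟨rfl, hp⟩ := hp
      exact ⟨t', hs, hp⟩
  · rintro ⟨r, hs, hp⟩
    exact ⟨a :: r, List.cons_prefix_cons.mpr ⟨rfl, hp⟩, hs⟩

-- digit-value injectivity
theorem pv_dv_inj (c c' : Char) (h : pvDigitVal c = pvDigitVal c') : c = c' := by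
  have hn : c.toNat = c'.toNat := by unfold pvDigitVal at h; omega
  rw [← Char.ofNat_toNat c, ← Char.ofNat_toNat c', hn]

-- ---- isIn ↔ scan membership, Bool level ----
theorem pv_isIn_task (l : List Char) (c d : Char) (hc : c ∈ pvD7) (hd : d ∈ pvD3) :
    PySem.Chars.isIn ['-','P',c,'-','T','0',d] l
      = decide ((pvDigitVal c, pvDigitVal d) ∈ (pvScan l).1) := by
  rw [Bool.eq_iff_iff, decide_eq_true_iff, PySem.Chars.isIn_iff_infix,
      pv_infix_cons_iff, pv_scan_task_mem]
  constructor
  · rintro ⟨r, hs, hp⟩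
    exact ⟨r, hs, (pvTaskAt_eq_some_iff r _).2 ⟨c, d, hc, hd, rfl, hp⟩⟩
  · rintro ⟨r, hs, h⟩
    obtain ⟨c', d', hc', hd', heq, hp⟩ := (pvTaskAt_eq_some_iff r _).1 h
    obtain ⟨h1, h2⟩ := Prod.mk.injEq .. ▸ heq
    rw [pv_dv_inj c c' h1, pv_dv_inj d d' h2]
    exact ⟨r, hs, hp⟩

theorem pv_isIn_phase (l : List Char) (c : Char) (hc : c ∈ pvD7) :
    PySem.Chars.isIn ['-','P',c] l = decide (pvDigitVal c ∈ (pvScan l).2.1) := by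
  rw [Bool.eq_iff_iff, decide_eq_true_iff, PySem.Chars.isIn_iff_infix,
      pv_infix_cons_iff, pv_scan_phase_mem]
  constructor
  · rintro ⟨r, hs, hp⟩
    exact ⟨r, hs, (pvPhaseAt_eq_some_iff r _).2 ⟨c, hc, rfl, hp⟩⟩
  · rintro ⟨r, hs, h⟩
    obtain ⟨c', hc', heq, hp⟩ := (pvPhaseAt_eq_some_iff r _).1 h
    rw [pv_dv_inj c c' heq]
    exact ⟨r, hs, hp⟩

theorem pv_mark_iff (l : List Char) :
    (pvScan l).2.2 = true ↔ ∃ d, d ∈ pvD3 ∧ PySem.Chars.isIn ['-','T','0',d] l = true := by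
  rw [pv_scan_mark]
  constructor
  · rintro ⟨r, hs, h⟩
    obtain ⟨d, hd, hp⟩ := (pvMarkAt_eq_true_iff r).1 h
    exact ⟨d, hd, (PySem.Chars.isIn_iff_infix _ _).2 ((pv_infix_cons_iff _ _ _).2 ⟨r, hs, hp⟩)⟩
  · rintro ⟨d, hd, h⟩
    obtain ⟨r, hs, hp⟩ := (pv_infix_cons_iff _ _ _).1 ((PySem.Chars.isIn_iff_infix _ _).1 h)
    exact ⟨r, hs, (pvMarkAt_eq_true_iff r).2 ⟨d, hd, hp⟩⟩

-- ---- min folds ----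
theorem pv_min2_cases (x y : Int × Int) : pvMin2 x y = x ∨ pvMin2 x y = y := by
  unfold pvMin2; split <;> simp

theorem pv_lexle_refl (x : Int × Int) : pvLexle x x := by unfold pvLexle; omega

theorem pv_lexle_trans {x y z : Int × Int} (h1 : pvLexle x y) (h2 : pvLexle y z) : pvLexle x z := by
  unfold pvLexle at *; omega

theorem pv_lexle_antisymm {x y : Int × Int} (h1 : pvLexle x y) (h2 : pvLexle y x) : x = y := by
  rcases x with ⟨a, b⟩; rcases y with ⟨c, d⟩
  unfold pvLexle at *; simp at *; omega

theorem pv_min2_le_left (x y : Int × Int) : pvLexle (pvMin2 x y) x := by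
  unfold pvMin2 pvLexle; split <;> omega

theorem pv_min2_le_right (x y : Int × Int) : pvLexle (pvMin2 x y) y := by
  unfold pvMin2 pvLexle; split <;> omega

theorem pv_foldl_min2_mem : ∀ (t : List (Int × Int)) (h : Int × Int), t.foldl pvMin2 h ∈ h :: t := by
  intro t
  induction t with
  | nil => intro h; simp [List.foldl]
  | cons a t ih =>
    intro h
    rw [List.foldl_cons]
    rcases List.mem_cons.1 (ih (pvMin2 h a)) with hm | hm
    · rw [hm]; rcases pv_min2_cases h a with h2 | h2 <;> rw [h2] <;> simp
    · exact List.mem_cons_of_mem _ (List.mem_cons_of_mem _ hm)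

theorem pv_foldl_min2_le : ∀ (t : List (Int × Int)) (h x : Int × Int),
    x ∈ h :: t → pvLexle (t.foldl pvMin2 h) x := by
  intro t
  induction t with
  | nil => intro h x hx; simp at hx; subst hx; exact pv_lexle_refl _
  | cons a t ih =>
    intro h x hx
    rw [List.foldl_cons]
    rcases List.mem_cons.1 hx with rfl | hx'
    · exact pv_lexle_trans (ih (pvMin2 x a) _ (List.mem_cons_self ..)) (pv_min2_le_left x a)
    · rcases List.mem_cons.1 hx' with rfl | hx''
      · exact pv_lexle_trans (ih (pvMin2 h x) _ (List.mem_cons_self ..)) (pv_min2_le_right h x)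
      · exact ih _ _ (List.mem_cons_of_mem _ hx'')

theorem pv_minI_cases (x y : Int) : pvMinI x y = x ∨ pvMinI x y = y := by
  unfold pvMinI; split <;> simp

theorem pv_minI_le_left (x y : Int) : pvMinI x y ≤ x := by unfold pvMinI; split <;> omega
theorem pv_minI_le_right (x y : Int) : pvMinI x y ≤ y := by unfold pvMinI; split <;> omega

theorem pv_foldl_minI_mem : ∀ (t : List Int) (h : Int), t.foldl pvMinI h ∈ h :: t := by
  intro t
  induction t with
  | nil => intro h; simp [List.foldl]
  | cons a t ih =>
    intro h
    rw [List.foldl_cons]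
    rcases List.mem_cons.1 (ih (pvMinI h a)) with hm | hm
    · rw [hm]; rcases pv_minI_cases h a with h2 | h2 <;> rw [h2] <;> simp
    · exact List.mem_cons_of_mem _ (List.mem_cons_of_mem _ hm)

theorem pv_foldl_minI_le : ∀ (t : List Int) (h x : Int), x ∈ h :: t → t.foldl pvMinI h ≤ x := by
  intro t
  induction t with
  | nil => intro h x hx; simp at hx; subst hx; simp [List.foldl]
  | cons a t ih =>
    intro h x hx
    rw [List.foldl_cons]
    rcases List.mem_cons.1 hx with rfl | hx'
    · exact le_trans (ih (pvMinI x a) _ (List.mem_cons_self ..)) (pv_minI_le_left x a)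
    · rcases List.mem_cons.1 hx' with rfl | hx''
      · exact le_trans (ih (pvMinI h x) _ (List.mem_cons_self ..)) (pv_minI_le_right h x)
      · exact ih _ _ (List.mem_cons_of_mem _ hx'')

theorem pv_lexlt_le {x y : Int × Int} (h : pvLexlt x y) : pvLexle x y := by
  unfold pvLexlt at h; unfold pvLexle; omega

-- ---- first hit of a lex-sorted probe list is the minimum of the hit set ----
theorem pv_find_min_pairs : ∀ (E S : List (Int × Int)), E.Pairwise pvLexlt → (∀ x ∈ S, x ∈ E) →
    E.find? (fun x => decide (x ∈ S)) =
      (match S with | [] => none | h :: t => some (t.foldl pvMin2 h)) := by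
  intro E
  induction E with
  | nil =>
    intro S _ hsub
    cases S with
    | nil => rfl
    | cons h t => exact absurd (hsub h (by simp)) (by simp)
  | cons e E ih =>
    intro S hsort hsub
    by_cases he : e ∈ S
    · rw [List.find?_cons_of_pos (by simpa using he)]
      cases S with
      | nil => simp at he
      | cons h t =>
        have hm := pv_foldl_min2_mem t h
        have hmle := pv_foldl_min2_le t h e he
        have hele : ∀ x ∈ h :: t, pvLexle e x := by
          intro x hx
          rcases List.mem_cons.1 (hsub x hx) with rfl | hx'
          · exact pv_lexle_refl _
          · exact pv_lexlt_le ((List.pairwise_cons.1 hsort).1 x hx')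
        show some e = some (List.foldl pvMin2 h t)
        rw [pv_lexle_antisymm hmle (hele _ hm)]
    · rw [List.find?_cons_of_neg (by simpa using he)]
      exact ih S (List.pairwise_cons.1 hsort).2 (fun x hx => by
        rcases List.mem_cons.1 (hsub x hx) with rfl | h'
        · exact absurd hx he
        · exact h')

theorem pv_find_min_int : ∀ (E S : List Int), E.Pairwise (· < ·) → (∀ x ∈ S, x ∈ E) →
    E.find? (fun x => decide (x ∈ S)) =
      (match S with | [] => none | h :: t => some (t.foldl pvMinI h)) := by
  intro E
  induction E with
  | nil =>
    intro S _ hsub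
    cases S with
    | nil => rfl
    | cons h t => exact absurd (hsub h (by simp)) (by simp)
  | cons e E ih =>
    intro S hsort hsub
    by_cases he : e ∈ S
    · rw [List.find?_cons_of_pos (by simpa using he)]
      cases S with
      | nil => simp at he
      | cons h t =>
        have hm := pv_foldl_minI_mem t h
        have hmle := pv_foldl_minI_le t h e he
        have hele : ∀ x ∈ h :: t, e ≤ x := by
          intro x hx
          rcases List.mem_cons.1 (hsub x hx) with rfl | hx'
          · exact le_refl _
          · exact le_of_lt ((List.pairwise_cons.1 hsort).1 x hx')
        show some e = some (List.foldl pvMinI h t)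
        rw [le_antisymm hmle (hele _ hm)]
    · rw [List.find?_cons_of_neg (by simpa using he)]
      exact ih S (List.pairwise_cons.1 hsort).2 (fun x hx => by
        rcases List.mem_cons.1 (hsub x hx) with rfl | h'
        · exact absurd hx he
        · exact h')

-- ---- reshaping A's nested early-return loops ----
theorem pv_findSome?_inner (p : Int) (C : Int → Int → Bool) : ∀ (l : List Int),
    l.findSome? (fun t => if C p t then some (p, t) else none)
      = (l.map (fun t => (p, t))).find? (fun q => C q.1 q.2) := by
  intro l
  induction l with
  | nil => rfl
  | cons a l ih =>
    by_cases h : C p a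
    · simp [List.findSome?_cons, List.find?_cons, h]
    · simp [List.findSome?_cons, List.find?_cons, h, ih]

theorem pv_findSome?_flat (C : Int × Int → Bool) : ∀ (l : List Int) (g : Int → List (Int × Int)),
    l.findSome? (fun p => (g p).find? C) = (l.flatMap g).find? C := by
  intro l g
  induction l with
  | nil => rfl
  | cons a l ih =>
    rw [List.findSome?_cons, List.flatMap_cons, List.find?_append, ← ih]
    cases h : (g a).find? C <;> simp [h]

theorem pv_find?_congr {α : Type} (l : List α) (p q : α → Bool) (h : ∀ x ∈ l, p x = q x) :
    l.find? p = l.find? q := by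
  induction l with
  | nil => rfl
  | cons a l ih =>
    rw [List.find?_cons, List.find?_cons, h a (by simp), ih (fun x hx => h x (by simp [hx]))]

theorem pv_A_chain (C : Int → Int → Bool) :
    (PySem.List.pyRange 0 7 1).findSome? (fun p =>
      (PySem.List.pyRange 1 4 1).findSome? (fun t => if C p t then some (p, t) else none))
      = pvEnumP.find? (fun q => C q.1 q.2) := by
  rw [show PySem.List.pyRange 0 7 1 = [0,1,2,3,4,5,6] from by decide,
      show PySem.List.pyRange 1 4 1 = [1,2,3] from by decide]
  simp only [pv_findSome?_inner]
  rw [pv_findSome?_flat (fun q => C q.1 q.2) [0,1,2,3,4,5,6]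
        (fun p => [1,2,3].map (fun t => (p, t)))]
  rfl

set_option maxRecDepth 20000 in
theorem pv_enum_sorted : pvEnumP.Pairwise pvLexlt := by
  unfold pvEnumP pvLexlt; decide

-- ---- subset facts ----
theorem pv_tasks_sub (l : List Char) : ∀ q ∈ (pvScan l).1, q ∈ pvEnumP := by
  intro q hq
  obtain ⟨r, _, h⟩ := (pv_scan_task_mem l q).1 hq
  obtain ⟨c, d, hc, hd, rfl, _⟩ := (pvTaskAt_eq_some_iff r q).1 h
  simp only [pvD7] at hc
  simp only [pvD3] at hd
  fin_cases hc <;> fin_cases hd <;> decide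

theorem pv_phases_sub (l : List Char) : ∀ p ∈ (pvScan l).2.1, p ∈ ([0,1,2,3,4,5,6] : List Int) := by
  intro p hp
  obtain ⟨r, _, h⟩ := (pv_scan_phase_mem l p).1 hp
  obtain ⟨c, hc, rfl, _⟩ := (pvPhaseAt_eq_some_iff r p).1 h
  simp only [pvD7] at hc
  fin_cases hc <;> decide

-- ---- the port's conditions as membership tests ----
theorem pv_cond_task (l : List Char) (p t : Int) (c d : Char)
    (hc : c ∈ pvD7) (hd : d ∈ pvD3)
    (hpc : p = pvDigitVal c) (htd : t = pvDigitVal d)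
    (h1 : (['-','P'] ++ PySem.Int.toChars p ++ ['-','T'] ++ pvFmt02 t) = ['-','P',c,'-','T','0',d])
    (h2 : (['-','P'] ++ PySem.Int.toChars p ++ ['-','T','0'] ++ PySem.Int.toChars t) = ['-','P',c,'-','T','0',d]) :
    (PySem.Chars.isIn (['-','P'] ++ PySem.Int.toChars p ++ ['-','T'] ++ pvFmt02 t) l
      || PySem.Chars.isIn (['-','P'] ++ PySem.Int.toChars p ++ ['-','T','0'] ++ PySem.Int.toChars t) l)
      = decide ((p, t) ∈ (pvScan l).1) := by
  rw [h1, h2, Bool.or_self, hpc, htd, pv_isIn_task l c d hc hd]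

theorem pv_cond_phase (l : List Char) (p : Int) (c : Char) (hc : c ∈ pvD7)
    (hpc : p = pvDigitVal c) (h1 : (['-','P'] ++ PySem.Int.toChars p) = ['-','P',c]) :
    PySem.Chars.isIn (['-','P'] ++ PySem.Int.toChars p) l = decide (p ∈ (pvScan l).2.1) := by
  rw [h1, hpc, pv_isIn_phase l c hc]

theorem pv_any_mark (l : List Char) :
    ((PySem.List.pyRange 1 4 1).any (fun t =>
      PySem.Chars.isIn (['-','T','0'] ++ PySem.Int.toChars t) l)) = (pvScan l).2.2 := by
  rw [show PySem.List.pyRange 1 4 1 = [1,2,3] from by decide, Bool.eq_iff_iff]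
  simp only [List.any_cons, List.any_nil, Bool.or_eq_true, Bool.or_false]
  constructor
  · rintro (h | h | h)
    · exact (pv_mark_iff l).2 ⟨'1', by simp [pvD3], h⟩
    · exact (pv_mark_iff l).2 ⟨'2', by simp [pvD3], h⟩
    · exact (pv_mark_iff l).2 ⟨'3', by simp [pvD3], h⟩
  · intro h
    obtain ⟨d, hd, hin⟩ := (pv_mark_iff l).1 h
    simp only [pvD3] at hd
    fin_cases hd
    · exact Or.inl hin
    · exact Or.inr (Or.inl hin)
    · exact Or.inr (Or.inr hin)

-- ===== VERDICT (by name: the statement is the Claim_ definition above) =====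
theorem classify_issue_spec : Claim_equal_classify_issue := by
  intro title _
  unfold Spec_classify_issue classify_issue classify_issue_alt
  by_cases hl : title.toList = []
  · simp [hl]
  · rw [if_neg hl, if_neg hl]
    rw [pv_A_chain (fun p t =>
      PySem.Chars.isIn (['-','P'] ++ PySem.Int.toChars p ++ ['-','T'] ++ pvFmt02 t) title.toList
      || PySem.Chars.isIn (['-','P'] ++ PySem.Int.toChars p ++ ['-','T','0'] ++ PySem.Int.toChars t) title.toList)]
    have hcong : ∀ q ∈ pvEnumP,
        (PySem.Chars.isIn (['-','P'] ++ PySem.Int.toChars q.1 ++ ['-','T'] ++ pvFmt02 q.2) title.toList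
          || PySem.Chars.isIn (['-','P'] ++ PySem.Int.toChars q.1 ++ ['-','T','0'] ++ PySem.Int.toChars q.2) title.toList)
          = decide (q ∈ (pvScan title.toList).1) := by
      intro q hq
      simp only [pvEnumP, List.mem_cons, List.not_mem_nil, or_false] at hq
      rcases hq with rfl|rfl|rfl|rfl|rfl|rfl|rfl|rfl|rfl|rfl|rfl|rfl|rfl|rfl|rfl|rfl|rfl|rfl|rfl|rfl|rfl
      · exact pv_cond_task _ 0 1 '0' '1' (by simp [pvD7]) (by simp [pvD3]) (by decide) (by decide) (by decide) (by decide)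
      · exact pv_cond_task _ 0 2 '0' '2' (by simp [pvD7]) (by simp [pvD3]) (by decide) (by decide) (by decide) (by decide)
      · exact pv_cond_task _ 0 3 '0' '3' (by simp [pvD7]) (by simp [pvD3]) (by decide) (by decide) (by decide) (by decide)
      · exact pv_cond_task _ 1 1 '1' '1' (by simp [pvD7]) (by simp [pvD3]) (by decide) (by decide) (by decide) (by decide)
      · exact pv_cond_task _ 1 2 '1' '2' (by simp [pvD7]) (by simp [pvD3]) (by decide) (by decide) (by decide) (by decide)
      · exact pv_cond_task _ 1 3 '1' '3' (by simp [pvD7]) (by simp [pvD3]) (by decide) (by decide) (by decide) (by decide)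
      · exact pv_cond_task _ 2 1 '2' '1' (by simp [pvD7]) (by simp [pvD3]) (by decide) (by decide) (by decide) (by decide)
      · exact pv_cond_task _ 2 2 '2' '2' (by simp [pvD7]) (by simp [pvD3]) (by decide) (by decide) (by decide) (by decide)
      · exact pv_cond_task _ 2 3 '2' '3' (by simp [pvD7]) (by simp [pvD3]) (by decide) (by decide) (by decide) (by decide)
      · exact pv_cond_task _ 3 1 '3' '1' (by simp [pvD7]) (by simp [pvD3]) (by decide) (by decide) (by decide) (by decide)
      · exact pv_cond_task _ 3 2 '3' '2' (by simp [pvD7]) (by simp [pvD3]) (by decide) (by decide) (by decide) (by decide)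
      · exact pv_cond_task _ 3 3 '3' '3' (by simp [pvD7]) (by simp [pvD3]) (by decide) (by decide) (by decide) (by decide)
      · exact pv_cond_task _ 4 1 '4' '1' (by simp [pvD7]) (by simp [pvD3]) (by decide) (by decide) (by decide) (by decide)
      · exact pv_cond_task _ 4 2 '4' '2' (by simp [pvD7]) (by simp [pvD3]) (by decide) (by decide) (by decide) (by decide)
      · exact pv_cond_task _ 4 3 '4' '3' (by simp [pvD7]) (by simp [pvD3]) (by decide) (by decide) (by decide) (by decide)
      · exact pv_cond_task _ 5 1 '5' '1' (by simp [pvD7]) (by simp [pvD3]) (by decide) (by decide) (by decide) (by decide)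
      · exact pv_cond_task _ 5 2 '5' '2' (by simp [pvD7]) (by simp [pvD3]) (by decide) (by decide) (by decide) (by decide)
      · exact pv_cond_task _ 5 3 '5' '3' (by simp [pvD7]) (by simp [pvD3]) (by decide) (by decide) (by decide) (by decide)
      · exact pv_cond_task _ 6 1 '6' '1' (by simp [pvD7]) (by simp [pvD3]) (by decide) (by decide) (by decide) (by decide)
      · exact pv_cond_task _ 6 2 '6' '2' (by simp [pvD7]) (by simp [pvD3]) (by decide) (by decide) (by decide) (by decide)
      · exact pv_cond_task _ 6 3 '6' '3' (by simp [pvD7]) (by simp [pvD3]) (by decide) (by decide) (by decide) (by decide)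
    rw [pv_find?_congr pvEnumP _ _ hcong,
        pv_find_min_pairs pvEnumP (pvScan title.toList).1 pv_enum_sorted (pv_tasks_sub title.toList)]
    cases hS : (pvScan title.toList).1 with
    | cons h t => simp [hS]
    | nil =>
      simp only [hS]
      simp only [pv_any_mark]
      cases hM : (pvScan title.toList).2.2 with
      | true =>
        simp only [hM, Bool.not_true, Bool.and_false]
        rw [show (List.find? (fun (_ : Int) => false) (PySem.List.pyRange 0 7 1)) = none from by decide]
        cases hP : (pvScan title.toList).2.1 <;> simp [hP]
      | false =>
        simp only [hM, Bool.not_false, Bool.and_true]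
        rw [show PySem.List.pyRange 0 7 1 = ([0,1,2,3,4,5,6] : List Int) from by decide]
        have hcongP : ∀ p ∈ ([0,1,2,3,4,5,6] : List Int),
            PySem.Chars.isIn (['-','P'] ++ PySem.Int.toChars p) title.toList
              = decide (p ∈ (pvScan title.toList).2.1) := by
          intro p hp
          simp only [List.mem_cons, List.not_mem_nil, or_false] at hp
          rcases hp with rfl|rfl|rfl|rfl|rfl|rfl|rfl
          · exact pv_cond_phase _ 0 '0' (by simp [pvD7]) (by decide) (by decide)
          · exact pv_cond_phase _ 1 '1' (by simp [pvD7]) (by decide) (by decide)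
          · exact pv_cond_phase _ 2 '2' (by simp [pvD7]) (by decide) (by decide)
          · exact pv_cond_phase _ 3 '3' (by simp [pvD7]) (by decide) (by decide)
          · exact pv_cond_phase _ 4 '4' (by simp [pvD7]) (by decide) (by decide)
          · exact pv_cond_phase _ 5 '5' (by simp [pvD7]) (by decide) (by decide)
          · exact pv_cond_phase _ 6 '6' (by simp [pvD7]) (by decide) (by decide)
        rw [pv_find?_congr _ _ _ hcongP,
            pv_find_min_int [0,1,2,3,4,5,6] (pvScan title.toList).2.1 (by decide)
              (pv_phases_sub title.toList)]
        cases hP : (pvScan title.toList).2.1 <;> simp [hP, hM]
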